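-- pv_equiv track=rewrite | github.com/Wiktor12283/QR-codes | main.py | add_padding_to_data
-- ===== SOURCE A (Python) =====
-- def add_padding_to_data(data_bits, total_capacity):
--     """Add padding to data to fill the QR code capacity"""
--     padded_bits = data_bits[:]
--
--     # Step 1: Add up to 4 terminator bits (0000) if there's room
--     terminator_bits = min(4, total_capacity - len(padded_bits))
--     padded_bits.extend([0] * terminator_bits)
--
--     # Step 2: Pad to make length multiple of 8 (byte boundary)
--     while len(padded_bits) % 8 != 0 and len(padded_bits) < total_capacity:
--         padded_bits.append(0)
--
--     # Step 3: Add alternating pad bytes (236, 17) until capacity is reached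
--     pad_bytes = [236, 17]  # 11101100, 00010001 in binary
--     pad_index = 0
--
--     while len(padded_bits) < total_capacity:
--         pad_byte = pad_bytes[pad_index % 2]
--         pad_bits = [int(bit) for bit in format(pad_byte, '08b')]
--
--         remaining_capacity = total_capacity - len(padded_bits)
--         bits_to_add = min(8, remaining_capacity)
--         padded_bits.extend(pad_bits[:bits_to_add])
--
--         pad_index += 1
--
--     return padded_bits
-- ===== SOURCE B (Python) =====
-- def add_padding_to_data(data_bits, total_capacity):
--     """Add padding to data to fill the QR code capacity (arithmetic + slicing, no loops)."""
--     bits = list(data_bits)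
--     n = len(bits)
--     # terminator: up to 4 zero bits, never past capacity
--     bits += [0] * max(0, min(4, total_capacity - n))
--     n = len(bits)
--     # pad with zeros to the byte boundary, stopping early at capacity
--     pad_to = min(total_capacity, ((n + 7) // 8) * 8)
--     bits += [0] * max(0, pad_to - n)
--     n = len(bits)
--     # alternating pad bytes 236, 17 as one repeated 16-bit pattern, sliced to fit
--     remaining = total_capacity - n
--     if remaining > 0:
--         pattern = [1, 1, 1, 0, 1, 1, 0, 0, 0, 0, 0, 1, 0, 0, 0, 1]
--         bits += (pattern * ((remaining + 15) // 16))[:remaining]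
--     return bits
-- ===== Notes on version B (the rewrite author's own statement) =====
-- stated objective: simpler
-- what changed: Replaced A's three loops (append-one-zero byte-alignment loop and per-byte pad loop that formats 236/17 to bit strings each iteration) with closed-form arithmetic: one min/max zero count for terminator+alignment and a single repeated 16-bit pattern sliced to the remaining capacity.
import Mathlib
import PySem

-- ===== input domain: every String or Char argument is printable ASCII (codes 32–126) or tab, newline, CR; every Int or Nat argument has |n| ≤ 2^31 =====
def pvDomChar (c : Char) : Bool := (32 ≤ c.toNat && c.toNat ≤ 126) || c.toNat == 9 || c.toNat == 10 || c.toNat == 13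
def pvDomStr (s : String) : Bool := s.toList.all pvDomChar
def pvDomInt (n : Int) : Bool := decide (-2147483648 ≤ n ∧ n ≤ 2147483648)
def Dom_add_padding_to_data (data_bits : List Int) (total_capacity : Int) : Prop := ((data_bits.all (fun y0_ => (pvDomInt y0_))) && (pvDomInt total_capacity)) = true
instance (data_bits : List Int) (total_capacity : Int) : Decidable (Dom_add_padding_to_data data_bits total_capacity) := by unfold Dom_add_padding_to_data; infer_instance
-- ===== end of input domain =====

-- B replaces A's three loops by arithmetic + one-shot replicate/slice (objective: simpler).

-- ===== PORT A =====

-- [int(bit) for bit in format(pad_byte, '08b')]; exact for 0 ≤ b < 256 (A only calls it on 236 and 17)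
def pvFormat08b (b : Int) : List Int :=
  (List.range 8).map (fun i => (b / 2 ^ (7 - i)) % 2)

-- Step 2 loop: while len(padded_bits) % 8 != 0 and len(padded_bits) < total_capacity: append(0)
def pvStep2 (bits : List Int) (cap : Int) : List Int :=
  if bits.length % 8 ≠ 0 ∧ (bits.length : Int) < cap then
    pvStep2 (bits ++ [0]) cap
  else bits
termination_by (cap - bits.length).toNat
decreasing_by simp only [List.length_append, List.length_cons, List.length_nil]; omega

-- Step 3 loop: while len(padded_bits) < total_capacity: extend pad_bits[:bits_to_add]; pad_index += 1
def pvStep3 (bits : List Int) (cap : Int) (padIndex : Nat) : List Int :=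
  if (bits.length : Int) < cap then
    let padByte := [(236 : Int), 17].getD (padIndex % 2) 0
    let padBits := pvFormat08b padByte
    let remaining := cap - bits.length
    let bitsToAdd := min 8 remaining
    pvStep3 (bits ++ padBits.take bitsToAdd.toNat) cap (padIndex + 1)
  else bits
termination_by (cap - bits.length).toNat
decreasing_by
  simp only [List.length_append, List.length_take, pvFormat08b, List.length_map,
    List.length_range]
  omega

def add_padding_to_data (data_bits : List Int) (total_capacity : Int) : List Int :=
  let padded_bits := data_bits
  let terminator_bits := min 4 (total_capacity - padded_bits.length)
  let padded_bits := padded_bits ++ List.replicate terminator_bits.toNat 0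
  let padded_bits := pvStep2 padded_bits total_capacity
  pvStep3 padded_bits total_capacity 0

-- ===== PORT B =====
def add_padding_to_data_alt (data_bits : List Int) (total_capacity : Int) : List Int :=
  let bits := data_bits
  let n : Int := bits.length
  let bits := bits ++ List.replicate (max 0 (min 4 (total_capacity - n))).toNat 0
  let n : Int := bits.length
  let pad_to := min total_capacity (PySem.Int.floordiv (n + 7) 8 * 8)
  let bits := bits ++ List.replicate (max 0 (pad_to - n)).toNat 0
  let n : Int := bits.length
  let remaining := total_capacity - n
  if remaining > 0 then
    let pattern : List Int := [1, 1, 1, 0, 1, 1, 0, 0, 0, 0, 0, 1, 0, 0, 0, 1]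
    bits ++ (List.replicate (PySem.Int.floordiv (remaining + 15) 16).toNat pattern).flatten.take remaining.toNat
  else bits

-- ===== PRECONDITION & SPEC =====
def Spec_add_padding_to_data (data_bits : List Int) (total_capacity : Int) (out : List Int) : Prop := out = add_padding_to_data_alt data_bits total_capacity
instance (data_bits : List Int) (total_capacity : Int) (out : List Int) : Decidable (Spec_add_padding_to_data data_bits total_capacity out) := by unfold Spec_add_padding_to_data; infer_instance

-- ===== CLAIM (what is proved, stated in full; the proofs are below) =====
def Claim_equal_add_padding_to_data : Prop := ∀ (data_bits : List Int) (total_capacity : Int), Dom_add_padding_to_data data_bits total_capacity → Spec_add_padding_to_data data_bits total_capacity (add_padding_to_data data_bits total_capacity)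

-- ===== LEMMAS AND PROOFS =====

def pvB236 : List Int := [1, 1, 1, 0, 1, 1, 0, 0]
def pvB17 : List Int := [0, 0, 0, 1, 0, 0, 0, 1]

-- the sequence of pad bytes' bits, k bytes long, starting at pad_index i
def pvRepBytes : Nat → Nat → List Int
  | _, 0 => []
  | i, k + 1 => (if i % 2 = 0 then pvB236 else pvB17) ++ pvRepBytes (i + 1) k

lemma pvRepBytes_parity : ∀ (k i j : Nat), i % 2 = j % 2 → pvRepBytes i k = pvRepBytes j k := by
  intro k
  induction k with
  | zero => intro i j _; rfl
  | succ k ih =>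
    intro i j h
    simp only [pvRepBytes, h]
    rw [ih (i + 1) (j + 1) (by omega)]

lemma pvRepBytes_flatten : ∀ (m : Nat),
    pvRepBytes 0 (2 * m) =
      (List.replicate m ([1, 1, 1, 0, 1, 1, 0, 0, 0, 0, 0, 1, 0, 0, 0, 1] : List Int)).flatten := by
  intro m
  induction m with
  | zero => rfl
  | succ m ih =>
    have h2 : 2 * (m + 1) = (2 * m) + 1 + 1 := by omega
    rw [h2]
    simp only [pvRepBytes, List.replicate_succ, List.flatten_cons]
    rw [pvRepBytes_parity (2 * m) 2 0 (by omega), ih]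
    simp [pvB236, pvB17]

lemma pvStep2_eq : ∀ (j : Nat) (bits : List Int) (cap : Int),
    (8 - bits.length % 8) % 8 ≤ j →
    pvStep2 bits cap =
      bits ++ List.replicate (min (cap - bits.length).toNat ((8 - bits.length % 8) % 8)) 0 := by
  intro j
  induction j with
  | zero =>
    intro bits cap hj
    rw [pvStep2]
    have h8 : bits.length % 8 = 0 := by omega
    simp [h8]
  | succ j ih =>
    intro bits cap hj
    rw [pvStep2]
    by_cases hc : bits.length % 8 ≠ 0 ∧ (bits.length : Int) < cap
    · obtain ⟨h1, h2⟩ := hc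
      rw [if_pos ⟨h1, h2⟩]
      rw [ih (bits ++ [0]) cap (by
        simp only [List.length_append, List.length_cons, List.length_nil]
        omega)]
      have hlen : (bits ++ [0]).length = bits.length + 1 := by simp
      rw [hlen]
      have hmin : min (cap - (bits.length : Int)).toNat ((8 - bits.length % 8) % 8)
          = min (cap - ((bits.length : Int) + 1)).toNat ((8 - (bits.length + 1) % 8) % 8) + 1 := by
        omega
      push_cast
      rw [hmin, List.replicate_succ, List.append_assoc]
      rfl
    · rw [if_neg hc]
      have hz : min (cap - (bits.length : Int)).toNat ((8 - bits.length % 8) % 8) = 0 := by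
        rw [Decidable.not_and_iff_or_not] at hc
        rcases hc with h | h <;> omega
      rw [hz]
      simp

lemma pvFormat_236 : pvFormat08b 236 = pvB236 := by decide
lemma pvFormat_17 : pvFormat08b 17 = pvB17 := by decide

lemma pvStep3_eq : ∀ (K : Nat) (bits : List Int) (cap : Int) (i : Nat),
    (bits.length : Int) ≤ cap → bits.length % 8 = 0 → (cap - bits.length).toNat ≤ 8 * K →
    pvStep3 bits cap i = bits ++ (pvRepBytes i K).take (cap - (bits.length : Int)).toNat := by
  intro K
  induction K with
  | zero =>
    intro bits cap i hle h8 hK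
    rw [pvStep3]
    have : ¬ ((bits.length : Int) < cap) := by omega
    simp [this, pvRepBytes]
  | succ K ih =>
    intro bits cap i hle h8 hK
    rw [pvStep3]
    by_cases hc : (bits.length : Int) < cap
    · simp only [hc, if_pos]
      have hbyte : pvFormat08b ([(236 : Int), 17].getD (i % 2) 0)
          = if i % 2 = 0 then pvB236 else pvB17 := by
        by_cases h : i % 2 = 0
        · simp [h, pvFormat_236]
        · have : i % 2 = 1 := by omega
          simp [this, pvFormat_17]
      set r : Int := cap - (bits.length : Int) with hr
      have hr0 : 0 < r := by omega
      by_cases hbig : 8 ≤ r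
      · -- a full byte is appended
        have hmin : (min 8 r).toNat = 8 := by omega
        have htake : (pvFormat08b ([(236 : Int), 17].getD (i % 2) 0)).take (min 8 r).toNat
            = if i % 2 = 0 then pvB236 else pvB17 := by
          rw [hbyte, hmin]
          by_cases h : i % 2 = 0 <;> simp [h, pvB236, pvB17]
        rw [htake]
        have hblen : (if i % 2 = 0 then pvB236 else pvB17).length = 8 := by
          by_cases h : i % 2 = 0 <;> simp [h, pvB236, pvB17]
        have hlen : ((bits ++ if i % 2 = 0 then pvB236 else pvB17).length : Int)
            = (bits.length : Int) + 8 := by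
          simp [hblen]
        rw [ih _ cap (i + 1) (by omega) (by simp [hblen]; omega) (by omega)]
        rw [hlen]
        simp only [pvRepBytes, List.append_assoc]
        congr 1
        rw [List.take_append]
        have h1 : (pvRepBytes i (K + 1)) = (if i % 2 = 0 then pvB236 else pvB17) ++ pvRepBytes (i + 1) K := rfl
        have ht1 : (if i % 2 = 0 then pvB236 else pvB17).take r.toNat
            = (if i % 2 = 0 then pvB236 else pvB17) := List.take_of_length_le (by omega)
        rw [ht1]
        congr 2
        · omega
      · -- partial byte: the loop then stops at capacity
        have hmin : (min 8 r).toNat = r.toNat := by omega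
        have htlen : ((pvFormat08b ([(236 : Int), 17].getD (i % 2) 0)).take (min 8 r).toNat).length
            = r.toNat := by
          rw [hbyte, hmin]
          by_cases h : i % 2 = 0 <;> simp [h, pvB236, pvB17] <;> omega
        rw [pvStep3]
        have hstop : ¬ (((bits ++ (pvFormat08b ([(236 : Int), 17].getD (i % 2) 0)).take (min 8 r).toNat).length : Int) < cap) := by
          simp only [List.length_append, htlen]
          push_cast
          omega
        simp only [hstop, if_neg, not_false_iff]
        simp only [pvRepBytes]
        rw [List.take_append]
        have hblen : (if i % 2 = 0 then pvB236 else pvB17).length = 8 := by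
          by_cases h : i % 2 = 0 <;> simp [h, pvB236, pvB17]
        have hz : r.toNat - (if i % 2 = 0 then pvB236 else pvB17).length = 0 := by omega
        rw [hz]
        simp only [List.take_zero, List.append_nil]
        rw [hbyte, hmin]
    · rw [if_neg hc]
      have hz : (cap - (bits.length : Int)).toNat = 0 := by omega
      simp [hz]

-- ===== VERDICT (by name: the statement is the Claim_ definition above) =====
theorem add_padding_to_data_spec : Claim_equal_add_padding_to_data := by
  intro data_bits cap _
  unfold Spec_add_padding_to_data add_padding_to_data add_padding_to_data_alt
  dsimp only
  have hmax : (max 0 (min 4 (cap - (data_bits.length : Int)))).toNat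
      = (min 4 (cap - (data_bits.length : Int))).toNat := by omega
  rw [hmax]
  set t : Nat := (min 4 (cap - (data_bits.length : Int))).toNat with ht
  set bits1 : List Int := data_bits ++ List.replicate t 0 with hb1
  have hn1 : bits1.length = data_bits.length + t := by simp [hb1]
  rw [pvStep2_eq 8 bits1 cap (by omega)]
  set k : Nat := min (cap - (bits1.length : Int)).toNat ((8 - bits1.length % 8) % 8) with hk
  have hfd : PySem.Int.floordiv ((bits1.length : Int) + 7) 8 = ((bits1.length : Int) + 7) / 8 :=
    PySem.Int.floordiv_eq_ediv_of_pos (by norm_num)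
  have hBz : (max 0 (min cap (PySem.Int.floordiv ((bits1.length : Int) + 7) 8 * 8) - (bits1.length : Int))).toNat = k := by
    rw [hfd]; omega
  rw [hBz]
  set bits2 : List Int := bits1 ++ List.replicate k 0 with hb2
  have hn2 : bits2.length = bits1.length + k := by simp [hb2]
  by_cases hpos : cap - (bits2.length : Int) > 0
  · rw [if_pos hpos]
    have h8 : bits2.length % 8 = 0 := by omega
    have hle : (bits2.length : Int) ≤ cap := by omega
    set reps : Nat := (PySem.Int.floordiv (cap - (bits2.length : Int) + 15) 16).toNat with hreps
    have hfd2 : PySem.Int.floordiv (cap - (bits2.length : Int) + 15) 16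
        = (cap - (bits2.length : Int) + 15) / 16 := PySem.Int.floordiv_eq_ediv_of_pos (by norm_num)
    have hreps' : reps = ((cap - (bits2.length : Int) + 15) / 16).toNat := by rw [hreps, hfd2]
    have hbound : (cap - (bits2.length : Int)).toNat ≤ 8 * (2 * reps) := by omega
    rw [pvStep3_eq (2 * reps) bits2 cap 0 hle h8 hbound, pvRepBytes_flatten reps]
  · rw [if_neg hpos]
    rw [pvStep3]
    rw [if_neg (by omega)]
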